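-- pv_equiv track=rewrite | github.com/OctavioPB/HR_Organization_Synapse | graph/knowledge_risk.py | compute_sole_experts
-- ===== SOURCE A (Python) =====
-- from collections import defaultdict
--
-- def compute_sole_experts(
--     contributions: dict[tuple[str, str], int],
-- ) -> set[tuple[str, str]]:
--     """Return the set of (employee_id, domain) pairs where the employee is the
--     sole contributor (no other active employee has docs in that domain).
--
--     Args:
--         contributions: Map (employee_id, domain) → doc_count.
--
--     Returns:
--         Set of (employee_id, domain) tuples that are sole experts.
--     """
--     # domain → set of contributing employees
--     domain_contributors: dict[str, set[str]] = defaultdict(set)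
--     for (emp_id, domain), count in contributions.items():
--         if count > 0:
--             domain_contributors[domain].add(emp_id)
--
--     sole: set[tuple[str, str]] = set()
--     for (emp_id, domain), count in contributions.items():
--         if count > 0 and len(domain_contributors[domain]) == 1:
--             sole.add((emp_id, domain))
--     return sole
-- ===== SOURCE B (Python) =====
-- def compute_sole_experts(
--     contributions: dict[tuple[str, str], int],
-- ) -> set[tuple[str, str]]:
--     """Brute force, no auxiliary mapping: an entry is a sole expert iff its
--     count is positive and no OTHER employee has a positive entry in the same
--     domain (direct nested scan over the items)."""
--     items = list(contributions.items())
--     return {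
--         (emp, dom)
--         for (emp, dom), count in items
--         if count > 0
--         and not any(
--             c2 > 0 and d2 == dom and e2 != emp
--             for (e2, d2), c2 in items
--         )
--     }
-- ===== Notes on version B (the rewrite author's own statement) =====
-- stated objective: alternative
-- what changed: A aggregates a dict of per-domain contributor sets in one pass and re-scans the contributions testing len==1; B builds no mapping at all and instead decides each entry by a direct nested scan: emit (emp, dom) iff count>0 and no other employee has a positive entry in that domain.
import Mathlib
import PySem

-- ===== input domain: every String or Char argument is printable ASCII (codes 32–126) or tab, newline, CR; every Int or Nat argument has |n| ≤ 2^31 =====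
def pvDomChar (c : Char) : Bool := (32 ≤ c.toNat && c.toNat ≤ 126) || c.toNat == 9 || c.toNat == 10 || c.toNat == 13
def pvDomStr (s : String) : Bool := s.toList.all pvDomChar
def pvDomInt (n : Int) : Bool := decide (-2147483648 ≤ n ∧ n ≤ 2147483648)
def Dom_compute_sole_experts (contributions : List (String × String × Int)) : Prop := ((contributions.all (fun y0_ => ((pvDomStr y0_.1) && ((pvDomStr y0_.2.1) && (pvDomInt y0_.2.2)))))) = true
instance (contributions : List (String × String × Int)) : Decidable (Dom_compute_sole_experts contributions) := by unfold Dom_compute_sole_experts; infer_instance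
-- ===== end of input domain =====

-- B replaces A's dict-of-sets aggregation by a direct nested scan with no auxiliary mapping:
-- an entry is emitted iff its count is positive and no other employee has a positive entry
-- in the same domain (alternative algorithm, quadratic, no intermediate structure).


-- ===== PORT A =====
def compute_sole_experts (contributions : List (String × String × Int)) : List (String × String) :=
  let domain_contributors : PySem.Dict String (PySem.Set String) :=
    contributions.foldl (fun d t =>
      if 0 < t.2.2 then d.modify t.2.1 PySem.Set.empty (fun s => PySem.Set.add s t.1) else d)
      PySem.Dict.empty
  contributions.foldl (fun sole t =>
    if 0 < t.2.2 then
      if PySem.Set.len (domain_contributors.getD t.2.1 PySem.Set.empty) = 1 then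
        PySem.Set.add sole (t.1, t.2.1)
      else sole
    else sole) PySem.Set.empty

-- ===== PORT B =====
def compute_sole_experts_alt (contributions : List (String × String × Int)) : List (String × String) :=
  PySem.Set.ofList
    ((contributions.filter (fun t =>
        decide (0 < t.2.2) &&
          !(contributions.any (fun u =>
              decide (0 < u.2.2) && (u.2.1 == t.2.1) && (u.1 != t.1))))).map
      (fun t => (t.1, t.2.1)))

-- ===== PRECONDITION & SPEC =====
-- contributions models a Python dict keyed by (employee, domain): Pre_ states the keys are distinct,
-- which every actual dict argument satisfies; it excludes no dict input.
def Pre_compute_sole_experts (contributions : List (String × String × Int)) : Prop :=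
  (contributions.map (fun t => (t.1, t.2.1))).Nodup
instance (contributions : List (String × String × Int)) : Decidable (Pre_compute_sole_experts contributions) := by unfold Pre_compute_sole_experts; infer_instance
def pvWitness_compute_sole_experts : (List (String × String × Int)) :=
  [("e1", "x", 3), ("e2", "x", 1), ("e3", "y", 2), ("e1", "y", 0)]

def Spec_compute_sole_experts (contributions : List (String × String × Int)) (out : List (String × String)) : Prop := out = compute_sole_experts_alt contributions
instance (contributions : List (String × String × Int)) (out : List (String × String)) : Decidable (Spec_compute_sole_experts contributions out) := by unfold Spec_compute_sole_experts; infer_instance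

-- ===== CLAIM (what is proved, stated in full; the proofs are below) =====
def Claim_equal_compute_sole_experts : Prop := ∀ (contributions : List (String × String × Int)), Dom_compute_sole_experts contributions → Pre_compute_sole_experts contributions → Spec_compute_sole_experts contributions (compute_sole_experts contributions)

-- ===== LEMMAS AND PROOFS =====

lemma pvA_dict (l : List (String × String × Int))
    (d : PySem.Dict String (PySem.Set String)) (k : String) :
    (l.foldl (fun d t => d.modify t.2.1 PySem.Set.empty (fun s => PySem.Set.add s t.1)) d).getD k PySem.Set.empty
      = PySem.Set.update (d.getD k PySem.Set.empty) ((l.filter (fun t => t.2.1 == k)).map (·.1)) := by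
  induction l generalizing d with
  | nil => simp [PySem.Set.update]
  | cons t l ih =>
    simp only [List.foldl_cons, List.filter_cons]
    rw [ih]
    by_cases h : t.2.1 = k
    · subst h
      simp [PySem.Dict.getD_modify_self, PySem.Set.update_cons, PySem.Set.add]
    · have : (t.2.1 == k) = false := by simp [h]
      rw [this]
      simp only [Bool.false_eq_true, if_false]
      rw [PySem.Dict.getD_modify]
      simp [Ne.symm h]

lemma pvEmps_nodup (l : List (String × String × Int))
    (h : (l.map (fun t => (t.1, t.2.1))).Nodup) (k : String) :
    ((l.filter (fun t => t.2.1 == k)).map (·.1)).Nodup := by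
  have hsub : ((l.filter (fun t => t.2.1 == k)).map (fun t => (t.1, t.2.1))).Sublist
      (l.map (fun t => (t.1, t.2.1))) :=
    List.Sublist.map _ (List.filter_sublist (l := l))
  have hnd : ((l.filter (fun t => t.2.1 == k)).map (fun t => (t.1, t.2.1))).Nodup :=
    h.sublist hsub
  have hinj := List.inj_on_of_nodup_map hnd
  apply List.Nodup.map_on _ (List.Nodup.of_map _ hnd)
  intro x hx y hy hxy
  have hxk := (List.mem_filter.mp hx).2
  have hyk := (List.mem_filter.mp hy).2
  exact hinj hx hy (by
    simp only [beq_iff_eq] at hxk hyk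
    simp [hxy, hxk, hyk])

lemma pv_foldl_guard {β : Type} (l : List (String × String × Int)) (f : β → (String × String × Int) → β) (init : β) :
    l.foldl (fun acc t => if 0 < t.2.2 then f acc t else acc) init
      = (l.filter (fun t => decide (0 < t.2.2))).foldl f init := by
  rw [List.foldl_filter]
  congr 1
  funext acc t
  by_cases h : (0:Int) < t.2.2 <;> simp [h]

lemma pvA_char (c : List (String × String × Int))
    (hpre : (c.map (fun t => (t.1, t.2.1))).Nodup) :
    compute_sole_experts c =
      ((c.filter (fun t => decide (0 < t.2.2))).filter
          (fun t => (c.filter (fun t => decide (0 < t.2.2))).countP (fun u => u.2.1 == t.2.1) == 1)).map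
        (fun t => (t.1, t.2.1)) := by
  set pos := c.filter (fun t => decide (0 < t.2.2)) with hpos
  have hposkeys : (pos.map (fun t => (t.1, t.2.1))).Nodup :=
    hpre.sublist (List.Sublist.map _ (List.filter_sublist (l := c)))
  unfold compute_sole_experts
  rw [pv_foldl_guard, pv_foldl_guard, ← hpos]
  have hlen : ∀ k : String,
      PySem.Set.len ((pos.foldl (fun d t => d.modify t.2.1 PySem.Set.empty (fun s => PySem.Set.add s t.1)) PySem.Dict.empty).getD k PySem.Set.empty)
        = (pos.countP (fun u => u.2.1 == k) : Int) := by
    intro k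
    rw [pvA_dict]
    have he : (PySem.Dict.empty : PySem.Dict String (PySem.Set String)).getD k PySem.Set.empty = PySem.Set.empty := by
      simp [PySem.Dict.getD_eq_get?_getD, PySem.Dict.get?_empty]
    rw [he]
    have : PySem.Set.update (PySem.Set.empty) ((pos.filter (fun t => t.2.1 == k)).map (·.1))
        = PySem.Set.ofList ((pos.filter (fun t => t.2.1 == k)).map (·.1)) :=
      PySem.Set.update_nil_left _
    rw [this, PySem.Set.ofList_eq_self_of_nodup _ (pvEmps_nodup pos hposkeys k)]
    simp [PySem.Set.len, List.countP_eq_length_filter]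
  have hbody : (fun (sole : PySem.Set (String × String)) (t : String × String × Int) =>
        if PySem.Set.len ((pos.foldl (fun d t => d.modify t.2.1 PySem.Set.empty (fun s => PySem.Set.add s t.1)) PySem.Dict.empty).getD t.2.1 PySem.Set.empty) = 1 then
          PySem.Set.add sole (t.1, t.2.1)
        else sole)
      = (fun sole t =>
        if (pos.countP (fun u => u.2.1 == t.2.1) == 1) = true then
          PySem.Set.add sole (t.1, t.2.1)
        else sole) := by
    funext sole t
    rw [hlen]
    by_cases h : pos.countP (fun u => u.2.1 == t.2.1) = 1
    · rw [if_pos (by exact_mod_cast h), if_pos (by simp [h])]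
    · rw [if_neg (by exact_mod_cast h), if_neg (by simp [h])]
  rw [hbody, ← List.foldl_filter, ← PySem.Set.update_map_eq_foldl_add]
  rw [PySem.Set.update_empty]
  apply PySem.Set.ofList_eq_self_of_nodup
  exact hposkeys.sublist (List.Sublist.map _ (List.filter_sublist (l := pos)))

lemma pvTwoMem {α : Type} {l : List α} {a b : α} (ha : a ∈ l) (hb : b ∈ l) (hne : a ≠ b) :
    1 < l.length := by
  cases l with
  | nil => cases ha
  | cons x xs =>
    cases xs with
    | nil =>
      simp only [List.mem_singleton] at ha hb
      exact absurd (ha.trans hb.symm) hne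
    | cons y ys => simp

lemma pvNoOther (pos : List (String × String × Int))
    (hnd : (pos.map (fun t => (t.1, t.2.1))).Nodup)
    (t : String × String × Int) (ht : t ∈ pos) :
    (pos.any (fun u => (u.2.1 == t.2.1) && (u.1 != t.1)))
      = !(pos.countP (fun u => u.2.1 == t.2.1) == 1) := by
  have hinj := List.inj_on_of_nodup_map hnd
  set f := pos.filter (fun u => u.2.1 == t.2.1) with hf
  have hcount : pos.countP (fun u => u.2.1 == t.2.1) = f.length :=
    List.countP_eq_length_filter ..
  have htf : t ∈ f := List.mem_filter.mpr ⟨ht, by simp⟩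
  have hfnd : f.Nodup := (List.Nodup.of_map _ hnd).filter _
  by_cases hany : ∃ u ∈ pos, u.2.1 = t.2.1 ∧ u.1 ≠ t.1
  · obtain ⟨u, hu, hdom, hemp⟩ := hany
    have huf : u ∈ f := List.mem_filter.mpr ⟨hu, by simp [hdom]⟩
    have hune : u ≠ t := fun h => hemp (by rw [h])
    have hlen : 1 < f.length := pvTwoMem huf htf hune
    have h1 : (pos.any (fun u => (u.2.1 == t.2.1) && (u.1 != t.1))) = true := by
      refine List.any_eq_true.mpr ⟨u, hu, ?_⟩
      simp [hdom, hemp]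
    have h2 : (pos.countP (fun u => u.2.1 == t.2.1) == 1) = false := by
      rw [hcount]; simp; omega
    rw [h1, h2]; rfl
  · push Not at hany
    have h1 : (pos.any (fun u => (u.2.1 == t.2.1) && (u.1 != t.1))) = false := by
      refine List.any_eq_false.mpr ?_
      intro u hu
      by_cases hd : u.2.1 = t.2.1
      · have := hany u hu hd
        simp [this]
      · simp [hd]
    -- every member of f equals t, so f has length 1
    have hall : ∀ u ∈ f, u = t := by
      intro u hu
      have hu' := List.mem_filter.mp hu
      have hdom : u.2.1 = t.2.1 := by simpa using hu'.2
      have hemp : u.1 = t.1 := hany u hu'.1 hdom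
      refine hinj hu'.1 ht ?_
      simp [hemp, hdom]
    have hlen : f.length = 1 := by
      cases hfe : f with
      | nil => rw [hfe] at htf; cases htf
      | cons x xs =>
        cases hxs : xs with
        | nil => simp
        | cons y ys =>
          exfalso
          have hx : x = t := hall x (by rw [hfe]; exact List.mem_cons_self)
          have hy : y = t := hall y (by rw [hfe, hxs]; simp)
          have := hfnd
          rw [hfe, hxs] at this
          have hxy : x ≠ y := by
            have := (List.nodup_cons.mp this).1
            intro h; exact this (by rw [h]; simp)
          exact hxy (hx.trans hy.symm)
    have h2 : (pos.countP (fun u => u.2.1 == t.2.1) == 1) = true := by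
      rw [hcount, hlen]; rfl
    rw [h1, h2]; rfl

lemma pvB_char (c : List (String × String × Int))
    (hpre : (c.map (fun t => (t.1, t.2.1))).Nodup) :
    compute_sole_experts_alt c =
      ((c.filter (fun t => decide (0 < t.2.2))).filter
          (fun t => (c.filter (fun t => decide (0 < t.2.2))).countP (fun u => u.2.1 == t.2.1) == 1)).map
        (fun t => (t.1, t.2.1)) := by
  set pos := c.filter (fun t => decide (0 < t.2.2)) with hpos
  have hposkeys : (pos.map (fun t => (t.1, t.2.1))).Nodup :=
    hpre.sublist (List.Sublist.map _ (List.filter_sublist (l := c)))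
  unfold compute_sole_experts_alt
  have hany : ∀ t : String × String × Int,
      (c.any (fun u => decide (0 < u.2.2) && (u.2.1 == t.2.1) && (u.1 != t.1)))
        = (pos.any (fun u => (u.2.1 == t.2.1) && (u.1 != t.1))) := by
    intro t
    rw [hpos, List.any_filter]
    congr 1
    funext u
    by_cases h : (0:Int) < u.2.2 <;> simp [h]
  have hsplit : (c.filter (fun t =>
        decide (0 < t.2.2) &&
          !(c.any (fun u => decide (0 < u.2.2) && (u.2.1 == t.2.1) && (u.1 != t.1)))))
      = pos.filter (fun t => !(pos.any (fun u => (u.2.1 == t.2.1) && (u.1 != t.1)))) := by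
    rw [hpos, List.filter_filter]
    apply List.filter_congr
    intro t _
    rw [hany t]
    exact Bool.and_comm _ _
  rw [hsplit]
  have hcong : pos.filter (fun t => !(pos.any (fun u => (u.2.1 == t.2.1) && (u.1 != t.1))))
      = pos.filter (fun t => pos.countP (fun u => u.2.1 == t.2.1) == 1) := by
    apply List.filter_congr
    intro t ht
    rw [pvNoOther pos hposkeys t ht, Bool.not_not]
  rw [hcong]
  apply PySem.Set.ofList_eq_self_of_nodup
  exact hposkeys.sublist (List.Sublist.map _ (List.filter_sublist (l := pos)))

-- ===== VERDICT (by name: the statement is the Claim_ definition above) =====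
theorem compute_sole_experts_spec : Claim_equal_compute_sole_experts := by
  intro c _hdom hpre
  unfold Spec_compute_sole_experts
  rw [pvA_char c hpre, pvB_char c hpre]
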